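-- pv_equiv track=rewrite | github.com/moqiguzhu/Online-Judge | leetcode-python/FooBar.py | jobSchedule
-- ===== SOURCE A (Python) =====
-- def jobSchedule(m, n, jobs=[]):
--     # 边界
--     if m >= n:
--         return max(jobs)
--
--     jobs = sorted(jobs)
--
--     q = jobs[0:m]
--
--     res = 0
--     for e in jobs[m:]:
--         res += q.pop(0)
--         q = [e-res for e in q]
--         q.append(e)
--     return res + q[-1]
-- ===== SOURCE B (Python) =====
-- # Alternative algorithm: the queue is never materialised.  The popped value at
-- # step k is always sorted_jobs[k-1] minus a sliding-window sum of the previous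
-- # res-values, so a single recurrence over prefix sums of res replaces A's
-- # queue rebuilding.
-- def jobSchedule(m, n, jobs=[]):
--     if m >= n:
--         return max(jobs)
--     js = sorted(jobs)
--     w = len(js[0:m])          # effective window (initial queue) size
--     P = [0]                   # prefix sums: P[k] = R_1 + ... + R_k
--     R = 0
--     for k in range(1, len(js) - w + 1):
--         lo = k - w if k > w else 0
--         R = R + js[k - 1] - (P[k - 1] - P[lo])
--         P.append(P[-1] + R)
--     return R + js[-1]
-- ===== Notes on version B (the rewrite author's own statement) =====
-- stated objective: alternative
-- what changed: B never builds the queue at all: the value A pops at step k is provably sorted_jobs[k-1] minus a sliding-window sum of earlier res values, so B runs one recurrence over prefix sums of res instead of popping, rewriting and appending to a queue.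
import Mathlib
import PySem

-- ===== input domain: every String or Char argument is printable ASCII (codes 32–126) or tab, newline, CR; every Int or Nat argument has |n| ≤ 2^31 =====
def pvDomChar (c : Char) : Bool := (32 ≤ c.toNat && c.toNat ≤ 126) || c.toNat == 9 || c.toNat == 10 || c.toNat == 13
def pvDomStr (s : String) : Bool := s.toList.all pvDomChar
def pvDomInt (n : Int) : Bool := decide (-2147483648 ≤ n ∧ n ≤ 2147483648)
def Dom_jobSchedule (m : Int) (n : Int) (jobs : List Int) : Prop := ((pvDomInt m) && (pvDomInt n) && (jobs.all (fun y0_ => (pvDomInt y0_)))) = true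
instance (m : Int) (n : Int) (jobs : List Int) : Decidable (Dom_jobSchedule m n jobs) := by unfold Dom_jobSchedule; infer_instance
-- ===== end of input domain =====

-- B drops A's queue entirely: the popped value at step k is sorted_jobs[k-1] minus a
-- sliding-window sum of earlier res values, computed through prefix sums (objective 'alternative').

-- ===== PORT A =====
-- the 'for e in jobs[m:]' loop of A: state (res, q)
def jobALoop : List Int → Int → List Int → Int × List Int
  | [], res, q => (res, q)
  | e :: rest, res, q =>
    match q with
    | [] => (res, [])          -- Python raises IndexError on q.pop(0); excluded by Pre_
    | h :: t => jobALoop rest (res + h) ((t.map (fun x => x - (res + h))) ++ [e])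

def jobSchedule (m : Int) (n : Int) (jobs : List Int) : Int :=
  if n ≤ m then
    match PySem.List.max? jobs (fun x => x) with
    | some v => v
    | none => 0                -- Python raises ValueError on max([]); excluded by Pre_
  else
    let js := PySem.List.sorted jobs (fun x => x) false
    let q0 := PySem.List.slice js (some 0) (some m)
    let t := jobALoop (PySem.List.slice js (some m) none) 0 q0
    t.1 + PySem.List.pyGetD t.2 (-1) 0   -- q[-1]; IndexError on empty q excluded by Pre_

-- ===== PORT B =====
-- Source B's 'for k in range(1, len(js)-w+1)' as the obvious fuel/counter recursion;
-- state (R, P) with P the list of prefix sums.  All list indices Source B uses are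
-- nonnegative and in range, so List.getD is exact for them.
def jobBLoop (js : List Int) (w : Nat) : Nat → Nat → Int → List Int → Int × List Int
  | 0, _, R, P => (R, P)
  | t + 1, k, R, P =>
    let lo := if k > w then k - w else 0
    let R' := R + js.getD (k - 1) 0 - (P.getD (k - 1) 0 - P.getD lo 0)
    jobBLoop js w t (k + 1) R' (P ++ [P.getD (P.length - 1) 0 + R'])

def jobSchedule_alt (m : Int) (n : Int) (jobs : List Int) : Int :=
  if n ≤ m then
    match PySem.List.max? jobs (fun x => x) with
    | some v => v
    | none => 0                -- Python raises ValueError on max([]); excluded by Pre_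
  else
    let js := PySem.List.sorted jobs (fun x => x) false
    let w := (PySem.List.slice js (some 0) (some m)).length
    let t := jobBLoop js w (js.length - w) 1 0 [0]
    t.1 + PySem.List.pyGetD js (-1) 0    -- js[-1]; IndexError on [] excluded by Pre_

-- ===== PRECONDITION & SPEC =====
-- Pre_ is exactly where the Python A returns: it excludes only inputs where A raises —
-- max([]) (ValueError), q.pop(0) from an empty queue, or q[-1] on an empty queue (IndexError).
def Pre_jobSchedule (m : Int) (n : Int) (jobs : List Int) : Prop :=
  jobs ≠ [] ∧ (n ≤ m ∨ 1 ≤ m ∨ (m < 0 ∧ 0 < (jobs.length : Int) + m))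
instance (m : Int) (n : Int) (jobs : List Int) : Decidable (Pre_jobSchedule m n jobs) := by
  unfold Pre_jobSchedule; infer_instance

def pvWitness_jobSchedule : Int × Int × List Int := (1, 2, [3, 1, 2])

def Spec_jobSchedule (m : Int) (n : Int) (jobs : List Int) (out : Int) : Prop := out = jobSchedule_alt m n jobs
instance (m : Int) (n : Int) (jobs : List Int) (out : Int) : Decidable (Spec_jobSchedule m n jobs out) := by unfold Spec_jobSchedule; infer_instance

-- ===== CLAIM =====
def Claim_equal_jobSchedule : Prop := ∀ (m : Int) (n : Int) (jobs : List Int), Dom_jobSchedule m n jobs → Pre_jobSchedule m n jobs → Spec_jobSchedule m n jobs (jobSchedule m n jobs)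

-- ===== LEMMAS AND PROOFS =====

-- the invariant queue: after k of A's steps, q's j-th entry is js[k+j] minus the
-- window of res-prefix-sums recorded in P
def invQ (js : List Int) (w k : Nat) (P : List Int) : List Int :=
  (List.range w).map (fun j => js.getD (k + j) 0 - (P.getD k 0 - P.getD (k + j + 1 - w) 0))

theorem bridge (js : List Int) (ww : Nat) :
    ∀ (t k : Nat) (R : Int) (P : List Int), P.length = k + 1 →
      ww + 1 + k + t = js.length →
      jobALoop (js.drop (ww + 1 + k)) R (invQ js (ww + 1) k P)
        = ((jobBLoop js (ww + 1) t (k + 1) R P).1,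
           invQ js (ww + 1) (k + t) (jobBLoop js (ww + 1) t (k + 1) R P).2) := by
  intro t
  induction t with
  | zero =>
    intro k R P hP hlen
    have hdrop : js.drop (ww + 1 + k) = [] := by
      simp [List.drop_eq_nil_iff]; omega
    simp [hdrop, jobALoop, jobBLoop]
  | succ t ih =>
    intro k R P hP hlen
    set w := ww + 1 with hw
    have hlt : w + k < js.length := by omega
    have hdrop : js.drop (w + k) = js.getD (w + k) 0 :: js.drop (w + k + 1) := by
      rw [List.getD_eq_getElem js 0 hlt]
      exact List.drop_eq_getElem_cons hlt
    -- split invQ into head :: tail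
    have hq : invQ js w k P
        = (js.getD k 0 - (P.getD k 0 - P.getD (k + 1 - w) 0))
          :: (List.range ww).map
              (fun j => js.getD (k + (j + 1)) 0 - (P.getD k 0 - P.getD (k + (j + 1) + 1 - w) 0)) := by
      unfold invQ
      rw [hw, List.range_succ_eq_map, List.map_cons, List.map_map]
      simp
    set R' := R + (js.getD k 0 - (P.getD k 0 - P.getD (k + 1 - w) 0)) with hR'
    set P' := P ++ [P.getD k 0 + R'] with hP'
    have hP'len : P'.length = (k + 1) + 1 := by simp [hP', hP]
    have hPk : P'.getD (k + 1) 0 = P.getD k 0 + R' := by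
      simp [hP', hP]
    have hPlt : ∀ i, i ≤ k → P'.getD i 0 = P.getD i 0 := by
      intro i hi
      have hlt2 : i < P.length := by omega
      rw [hP', List.getD_append _ _ _ _ hlt2]
    -- A's one step produces the invariant queue at k+1 with P'
    have hstep : (((List.range ww).map
          (fun j => js.getD (k + (j + 1)) 0 - (P.getD k 0 - P.getD (k + (j + 1) + 1 - w) 0))).map
            (fun x => x - R')) ++ [js.getD (w + k) 0]
        = invQ js w (k + 1) P' := by
      unfold invQ
      rw [List.range_succ, List.map_append, List.map_map]
      congr 1
      · apply List.map_congr_left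
        intro j hj
        have hjlt : j < ww := List.mem_range.mp hj
        have hidx : k + (j + 1) + 1 - w = k + 1 + j + 1 - w := by omega
        have hle : k + 1 + j + 1 - w ≤ k := by omega
        simp only [Function.comp_apply]
        rw [hPk, hPlt _ hle, hidx]
        ring_nf
      · simp only [List.map_cons, List.map_nil]
        congr 1
        have he : k + 1 + ww + 1 - w = k + 1 := by omega
        have he2 : k + 1 + ww = w + k := by omega
        rw [he, he2, hPk]
        ring
    -- B's one step
    have hB : jobBLoop js w (t + 1) (k + 1) R P
        = jobBLoop js w t (k + 1 + 1) R' P' := by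
      have hlo : (if k + 1 > w then k + 1 - w else 0) = k + 1 - w := by
        split <;> omega
      conv_lhs => rw [jobBLoop]
      simp only [hlo, hP, Nat.add_sub_cancel]
      have hRa : R + js.getD k 0 - (P.getD k 0 - P.getD (k + 1 - w) 0) = R' := by
        rw [hR']; ring
      rw [hRa, ← hP']
    rw [hq, hdrop, jobALoop, ← hR', hstep]
    have hih := ih (k + 1) R' P' hP'len (by omega)
    have harr : w + k + 1 = w + (k + 1) := by omega
    rw [harr, hih, hB]
    congr 2
    omega

theorem take_eq_range_map (js : List Int) (w : Nat) (hw : w ≤ js.length) :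
    js.take w = (List.range w).map (fun j => js.getD j 0) := by
  apply List.ext_getElem
  · simp; omega
  · intro i h1 h2
    have hi : i < w := by simpa using h2
    have hiN : i < js.length := by omega
    simp [List.getElem_take, List.getElem?_eq_getElem hiN]

-- q0 = js[0:m] is a prefix of js: it is js.take of its own length
theorem slice_prefix (js : List Int) (m : Int) :
    PySem.List.slice js (some 0) (some m)
      = js.take (PySem.List.slice js (some 0) (some m)).length := by
  rw [PySem.List.slice_zero_start]
  by_cases hm : 0 ≤ m
  · rw [PySem.List.slice_to js hm]
    simp only [List.length_take]
    rcases Nat.le_total m.toNat js.length with h | h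
    · rw [Nat.min_eq_left h]
    · rw [Nat.min_eq_right h, List.take_length, List.take_of_length_le h]
  · have hk : m = -(((-m).toNat : Nat) : Int) := by omega
    by_cases hz : (-m).toNat = 0
    · omega
    · rw [hk, PySem.List.slice_to_neg_natCast js ((-m).toNat) (by omega)]
      simp only [List.length_take]
      rw [Nat.min_eq_left (by omega)]

theorem w_pos (m : Int) (jobs : List Int) (hne : jobs ≠ [])
    (hm : 1 ≤ m ∨ (m < 0 ∧ 0 < (jobs.length : Int) + m)) :
    1 ≤ (PySem.List.slice (PySem.List.sorted jobs (fun x => x) false) (some 0) (some m)).length := by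
  set js := PySem.List.sorted jobs (fun x => x) false with hjs
  have hlen : js.length = jobs.length := (PySem.List.sorted_perm jobs (fun x => x) false).length_eq
  have hNpos : 1 ≤ js.length := by
    rcases List.exists_cons_of_ne_nil hne with ⟨a, t, rfl⟩
    simp at hlen; omega
  rw [PySem.List.slice_zero_start]
  rcases hm with hm | ⟨hmneg, hpos⟩
  · rw [PySem.List.slice_to js (by omega : (0:Int) ≤ m)]
    simp; omega
  · have hk : m = -(((-m).toNat : Nat) : Int) := by omega
    rw [hk, PySem.List.slice_to_neg_natCast js ((-m).toNat) (by omega)]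
    simp; omega

theorem slice_from_drop (js : List Int) (m : Int) :
    PySem.List.slice js (some m) none
      = js.drop (PySem.List.slice js (some 0) (some m)).length := by
  rw [PySem.List.slice_zero_start]
  by_cases hm : 0 ≤ m
  · rw [PySem.List.slice_to js hm, PySem.List.slice_from js hm]
    simp only [List.length_take]
    rcases Nat.le_total m.toNat js.length with h | h
    · rw [Nat.min_eq_left h]
    · rw [Nat.min_eq_right h, List.drop_eq_nil_iff.mpr (by omega),
          List.drop_eq_nil_iff.mpr (by omega)]
  · have hk : m = -(((-m).toNat : Nat) : Int) := by omega
    by_cases hz : (-m).toNat = 0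
    · omega
    · rw [hk, PySem.List.slice_to_neg_natCast js ((-m).toNat) (by omega),
          PySem.List.slice_from_neg_natCast js ((-m).toNat) (by omega)]
      simp only [List.length_take]
      rw [Nat.min_eq_left (by omega)]

theorem getLast_invQ (js : List Int) (ww K : Nat) (P : List Int)
    (hK : ww + 1 + K = js.length) (h : invQ js (ww + 1) K P ≠ []) :
    (invQ js (ww + 1) K P).getLast h = js.getD (js.length - 1) 0 := by
  unfold invQ
  rw [List.getLast_eq_getElem]
  have hlen : ((List.range (ww + 1)).map
      (fun j => js.getD (K + j) 0 - (P.getD K 0 - P.getD (K + j + 1 - (ww + 1)) 0))).length = ww + 1 := by simp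
  simp only [List.getElem_map, hlen, List.getElem_range]
  have h1 : K + (ww + 1 - 1) = js.length - 1 := by omega
  have h2 : K + (ww + 1 - 1) + 1 - (ww + 1) = K := by omega
  rw [h2, h1]
  ring

-- ===== VERDICT =====
theorem jobSchedule_spec : Claim_equal_jobSchedule := by
  intro m n jobs _ hpre
  unfold Spec_jobSchedule jobSchedule jobSchedule_alt
  by_cases hnm : n ≤ m
  · simp [hnm]
  · simp only [if_neg hnm]
    obtain ⟨hne, hdisj⟩ := hpre
    have hm : 1 ≤ m ∨ (m < 0 ∧ 0 < (jobs.length : Int) + m) := by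
      rcases hdisj with h | h | h
      · exact absurd h hnm
      · exact Or.inl h
      · exact Or.inr h
    set js := PySem.List.sorted jobs (fun x => x) false with hjs
    have hjsne : js ≠ [] := by
      rw [hjs]; simpa [PySem.List.sorted_eq_nil_iff] using hne
    have hlen : js.length = jobs.length := (PySem.List.sorted_perm jobs (fun x => x) false).length_eq
    set w := (PySem.List.slice js (some 0) (some m)).length with hwdef
    have hw1 : 1 ≤ w := by rw [hwdef, hjs]; exact w_pos m jobs hne hm
    have hwN : w ≤ js.length := by
      rw [hwdef, slice_prefix js m, ← hwdef]; simp
    obtain ⟨ww, hww⟩ : ∃ ww, w = ww + 1 := ⟨w - 1, by omega⟩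
    have hq0 : PySem.List.slice js (some 0) (some m) = invQ js w 0 [0] := by
      rw [slice_prefix js m, ← hwdef, take_eq_range_map js w hwN]
      unfold invQ
      apply List.map_congr_left
      intro j hj
      have hjw : j + 1 - w = 0 := by
        have := List.mem_range.mp hj; omega
      simp [hjw]
    have htail : PySem.List.slice js (some m) none = js.drop (w + 0) := by
      rw [slice_from_drop js m, ← hwdef]; norm_num
    rw [hq0, htail, hww]
    have hbr := bridge js ww (js.length - w) 0 0 [0] (by simp) (by omega)
    rw [hww] at hbr
    rw [hbr]
    simp only []
    congr 1
    set res := jobBLoop js (ww + 1) (js.length - (ww + 1)) 1 0 [0] with hres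
    have hKlen : ww + 1 + (0 + (js.length - w)) = js.length := by omega
    have hKlen' : ww + 1 + (0 + (js.length - (ww + 1))) = js.length := by omega
    have hqne : invQ js (ww + 1) (0 + (js.length - (ww + 1))) res.2 ≠ [] := by
      unfold invQ; simp
    rw [PySem.List.pyGetD_neg_one _ 0 hqne,
        PySem.List.pyGetD_neg_one _ 0 hjsne,
        getLast_invQ js ww _ res.2 hKlen' hqne]
    rw [List.getLast_eq_getElem]
    have hNpos : 0 < js.length := by omega
    rw [List.getD_eq_getElem js 0 (by omega)]
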